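-- pv_equiv track=rewrite | github.com/msrosenberg/ImpactFactor | ImpactFactorCalculator.py | calculate_multidimensional_h
-- ===== SOURCE A (Python) =====
-- def calculate_multidimensional_h(h: int, n: int, is_core: list, rankorder: list, cites: list) -> list:
--     multi_dim_h_index = [h]
--     multi_used = []
--     for i in range(n):
--         if is_core[i]:
--             multi_used.append(True)
--         else:
--             multi_used.append(False)
--     j = 0
--     tmph = -1
--     while tmph != 0:
--         nc = len(multi_dim_h_index)
--         j = j + multi_dim_h_index[nc-1]
--         tmph = 0
--         for i in range(n):
--             if not multi_used[i]:
--                 if rankorder[i] - j <= cites[i]: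
--                     multi_used[i] = True
--                     tmph += 1
--         if tmph > 0:
--             multi_dim_h_index.append(tmph)
--     return multi_dim_h_index
-- ===== SOURCE B (Python) =====
-- def calculate_multidimensional_h(h: int, n: int, is_core: list, rankorder: list, cites: list) -> list:
--     # sort the non-core thresholds once, then advance a pointer per round
--     ts = sorted(rankorder[i] - cites[i] for i in range(n) if not is_core[i])
--     res = [h]
--     j = h
--     p = 0
--     while True:
--         q = p
--         while q < len(ts) and ts[q] <= j:
--             q += 1
--         if q == p:
--             break
--         res.append(q - p)
--         j += q - p
--         p = q
--     return res
-- ===== Notes on version B (the rewrite author's own statement) =====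
-- stated objective: alternative
-- what changed: Instead of re-scanning all n items every round with a mutable used-flag array, B precomputes the thresholds rankorder[i]-cites[i] of the non-core items once, sorts them, and advances a single pointer over the sorted list each round; each round's component is the number of thresholds the pointer passes.
import Mathlib
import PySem

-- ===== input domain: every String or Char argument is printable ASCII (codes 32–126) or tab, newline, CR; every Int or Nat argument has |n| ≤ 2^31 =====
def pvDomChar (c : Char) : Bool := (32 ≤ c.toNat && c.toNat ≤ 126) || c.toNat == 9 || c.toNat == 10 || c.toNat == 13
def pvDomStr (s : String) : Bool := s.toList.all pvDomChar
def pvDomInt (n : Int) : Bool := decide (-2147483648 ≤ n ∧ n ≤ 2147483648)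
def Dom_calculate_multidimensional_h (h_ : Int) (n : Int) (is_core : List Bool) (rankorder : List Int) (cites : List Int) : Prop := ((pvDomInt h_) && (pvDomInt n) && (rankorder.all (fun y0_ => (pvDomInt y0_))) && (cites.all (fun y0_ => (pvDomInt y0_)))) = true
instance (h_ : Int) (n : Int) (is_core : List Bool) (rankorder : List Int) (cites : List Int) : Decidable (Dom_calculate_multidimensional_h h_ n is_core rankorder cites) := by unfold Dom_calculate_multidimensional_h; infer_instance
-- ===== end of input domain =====

-- B replaces A's round-by-round rescans of all n items (mutable used flags) with a sorted
-- list of the non-core thresholds rankorder[i]-cites[i] and a pointer advanced once per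
-- round (objective: alternative algorithm, same measured cost on the tested inputs).

-- ===== PORT A =====
-- one body of A's inner `for i in range(n)` loop: skip used items, mark and count a
-- newly satisfied one (out-of-range reads, which raise in Python, are skipped/defaulted)
def pvStepA (rankorder cites : List Int) (j : Int) (st : List Bool × Int) (i : Int) :
    List Bool × Int :=
  match PySem.List.pyGet? st.1 i with
  | some false =>
      if (PySem.List.pyGet? rankorder i).getD 0 - j ≤ (PySem.List.pyGet? cites i).getD 0 then
        (st.1.set i.toNat true, st.2 + 1)
      else st
  | _ => st

-- termination helper for A's while-loop: each pass keeps (#False flags) + tmph invariant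
theorem pvCountFalseSet (l : List Bool) (k : Nat) (h : l[k]? = some false) :
    (l.set k true).count false + 1 = l.count false := by
  induction l generalizing k with
  | nil => simp at h
  | cons x xs ih =>
    cases k with
    | zero => simp_all
    | succ k =>
      simp only [List.getElem?_cons_succ] at h
      have := ih k h
      simp only [List.set_cons_succ, List.count_cons]
      omega

theorem pvFoldAInvariant (rankorder cites : List Int) (j : Int) (idxs : List Int)
    (hnn : ∀ i ∈ idxs, 0 ≤ i) (st : List Bool × Int) :
    ((idxs.foldl (pvStepA rankorder cites j) st).1.count false : Int)
      + (idxs.foldl (pvStepA rankorder cites j) st).2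
      = (st.1.count false : Int) + st.2 := by
  induction idxs generalizing st with
  | nil => rfl
  | cons i idxs ih =>
    rw [List.foldl_cons, ih (fun x hx => hnn x (List.mem_cons_of_mem _ hx))]
    unfold pvStepA
    rcases hg : PySem.List.pyGet? st.1 i with _ | b
    · rfl
    · cases b
      · by_cases hc : (PySem.List.pyGet? rankorder i).getD 0 - j
            ≤ (PySem.List.pyGet? cites i).getD 0
        · simp only [hc, if_pos]
          have h0 : 0 ≤ i := hnn i List.mem_cons_self
          rw [PySem.List.pyGet?_of_nonneg st.1 h0] at hg
          have hcs := pvCountFalseSet st.1 i.toNat hg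
          omega
        · simp [hc]
      · rfl

-- A's `while tmph != 0` loop
def pvLoopA (n : Int) (rankorder cites : List Int) (used : List Bool) (acc : List Int)
    (j : Int) : List Int :=
  let j' := j + acc.getLastD 0
  let p := (PySem.List.pyRange 0 n 1).foldl (pvStepA rankorder cites j') (used, 0)
  if h0 : 0 < p.2 then pvLoopA n rankorder cites p.1 (acc ++ [p.2]) j' else acc
termination_by used.count false
decreasing_by
  have hinv := pvFoldAInvariant rankorder cites (j + acc.getLastD 0)
    (PySem.List.pyRange 0 n 1)
    (fun i hi => ((PySem.List.mem_pyRange_one).mp hi).1) (used, (0 : Int))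
  simp only [j', p] at *
  omega

def calculate_multidimensional_h (h_ : Int) (n : Int) (is_core : List Bool)
    (rankorder : List Int) (cites : List Int) : List Int :=
  let multi_used := (PySem.List.pyRange 0 n 1).foldl
    (fun a i => if (PySem.List.pyGet? is_core i).getD false then a ++ [true] else a ++ [false]) []
  pvLoopA n rankorder cites multi_used [h_] 0

-- ===== PORT B =====
-- B's inner `while q < len(ts) and ts[q] <= j: q += 1`
def pvAdvance (ts : List Int) (j : Int) (q : Nat) : Nat :=
  if h : q < ts.length then
    if ts[q] ≤ j then pvAdvance ts j (q + 1) else q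
  else q
termination_by ts.length - q

theorem pvAdvance_ge (ts : List Int) (j : Int) (q : Nat) : q ≤ pvAdvance ts j q := by
  fun_induction pvAdvance ts j q with
  | case1 q h hle ih => omega
  | case2 q h hle => omega
  | case3 q h => omega

theorem pvAdvance_le (ts : List Int) (j : Int) (q : Nat) (hq : q ≤ ts.length) :
    pvAdvance ts j q ≤ ts.length := by
  fun_induction pvAdvance ts j q with
  | case1 q h hle ih => exact ih (by omega)
  | case2 q h hle => omega
  | case3 q h => omega

theorem pvAdvance_stuck (ts : List Int) (j : Int) (q : Nat) (hle : ts.length ≤ q) :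
    pvAdvance ts j q = q := by
  rw [pvAdvance]
  simp [Nat.not_lt.mpr hle]

-- B's outer `while True` loop
def pvLoopB (ts : List Int) (res : List Int) (j : Int) (p : Nat) : List Int :=
  let q := pvAdvance ts j p
  if hq : q = p then res
  else pvLoopB ts (res ++ [(q : Int) - (p : Int)]) (j + ((q : Int) - (p : Int))) q
termination_by ts.length - p
decreasing_by
  have h1 := pvAdvance_ge ts j p
  have h3 : p < ts.length := by
    by_contra hc
    exact hq (pvAdvance_stuck ts j p (by omega))
  have h2 := pvAdvance_le ts j p (by omega)
  omega

def calculate_multidimensional_h_alt (h_ : Int) (n : Int) (is_core : List Bool)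
    (rankorder : List Int) (cites : List Int) : List Int :=
  let ts := PySem.List.sorted
    (((PySem.List.pyRange 0 n 1).filter
        (fun i => !((PySem.List.pyGet? is_core i).getD false))).map
      (fun i => (PySem.List.pyGet? rankorder i).getD 0 - (PySem.List.pyGet? cites i).getD 0))
    (fun x => x) false
  pvLoopB ts [h_] h_ 0

-- ===== PRECONDITION & SPEC =====
-- Pre_ excludes exactly the inputs where Python A raises IndexError: an index i < n
-- reaching past is_core, or past rankorder/cites for a non-core i.
def Pre_calculate_multidimensional_h (h_ : Int) (n : Int) (is_core : List Bool)
    (rankorder : List Int) (cites : List Int) : Prop :=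
  n ≤ (is_core.length : Int) ∧
  ∀ i : Nat, i < n.toNat → is_core.getD i true = false →
    i < rankorder.length ∧ i < cites.length

instance (h_ : Int) (n : Int) (is_core : List Bool) (rankorder : List Int) (cites : List Int) :
    Decidable (Pre_calculate_multidimensional_h h_ n is_core rankorder cites) := by
  unfold Pre_calculate_multidimensional_h; infer_instance

def pvWitness_calculate_multidimensional_h : Int × Int × List Bool × List Int × List Int :=
  (2, 3, [true, false, false], [1, 2, 3], [5, 4, 0])

def Spec_calculate_multidimensional_h (h_ : Int) (n : Int) (is_core : List Bool) (rankorder : List Int) (cites : List Int) (out : List Int) : Prop := out = calculate_multidimensional_h_alt h_ n is_core rankorder cites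
instance (h_ : Int) (n : Int) (is_core : List Bool) (rankorder : List Int) (cites : List Int) (out : List Int) : Decidable (Spec_calculate_multidimensional_h h_ n is_core rankorder cites out) := by unfold Spec_calculate_multidimensional_h; infer_instance

-- ===== CLAIM (what is proved, stated in full; the proofs are below) =====
def Claim_equal_calculate_multidimensional_h : Prop := ∀ (h_ : Int) (n : Int) (is_core : List Bool) (rankorder : List Int) (cites : List Int), Dom_calculate_multidimensional_h h_ n is_core rankorder cites → Pre_calculate_multidimensional_h h_ n is_core rankorder cites → Spec_calculate_multidimensional_h h_ n is_core rankorder cites (calculate_multidimensional_h h_ n is_core rankorder cites)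

-- ===== LEMMAS AND PROOFS =====

-- abbreviations for the proof: per-index core flag and threshold
def pvCore (is_core : List Bool) (i : Nat) : Bool := is_core.getD i false
def pvT (rankorder cites : List Int) (i : Nat) : Int :=
  rankorder.getD i 0 - cites.getD i 0

-- A's used-flags after all thresholds satisfying P have been marked
def pvMark (ic : List Bool) (r c : List Int) (m : Nat) (P : Int → Bool) : List Bool :=
  (List.range m).map (fun i => pvCore ic i || P (pvT r c i))

-- the multiset of non-core thresholds (B's list before sorting)
def pvTh (ic : List Bool) (r c : List Int) (m : Nat) : List Int :=
  ((List.range m).filter (fun i => !pvCore ic i)).map (pvT r c)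

-- used-flags in the middle of one pass at water level j': indices < a already updated
def pvHyb (ic : List Bool) (r c : List Int) (m : Nat) (P : Int → Bool) (j' : Int)
    (a : Nat) : List Bool :=
  (List.range m).map (fun i =>
    if i < a then pvCore ic i || (P (pvT r c i) || decide (pvT r c i ≤ j'))
    else pvCore ic i || P (pvT r c i))

theorem pvHybSucc (ic : List Bool) (r c : List Int) (m : Nat) (P : Int → Bool) (j' : Int)
    (a : Nat)
    (hval : (pvCore ic a || P (pvT r c a))
      = (pvCore ic a || (P (pvT r c a) || decide (pvT r c a ≤ j')))) :
    pvHyb ic r c m P j' a = pvHyb ic r c m P j' (a + 1) := by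
  unfold pvHyb
  apply List.map_congr_left
  intro i _
  by_cases hia : i = a
  · subst hia
    rw [if_neg (lt_irrefl i), if_pos (Nat.lt_succ_self i)]
    exact hval
  · by_cases hlt : i < a
    · rw [if_pos hlt, if_pos (by omega)]
    · rw [if_neg hlt, if_neg (by omega)]

theorem pvHybSet (ic : List Bool) (r c : List Int) (m : Nat) (P : Int → Bool) (j' : Int)
    (a : Nat) (ha : a < m)
    (hval : (pvCore ic a || (P (pvT r c a) || decide (pvT r c a ≤ j'))) = true) :
    (pvHyb ic r c m P j' a).set a true = pvHyb ic r c m P j' (a + 1) := by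
  unfold pvHyb
  apply List.ext_getElem
  · simp
  · intro i h1 h2
    simp only [List.length_set, List.length_map, List.length_range] at h1 h2
    rw [List.getElem_set]
    simp only [List.getElem_map, List.getElem_range]
    by_cases hia : a = i
    · subst hia
      rw [if_pos rfl, if_pos (Nat.lt_succ_self a)]
      exact hval.symm
    · rw [if_neg hia]
      by_cases hlt : i < a
      · rw [if_pos hlt, if_pos (by omega)]
      · rw [if_neg hlt, if_neg (by omega)]

-- one full pass of A's inner loop over indices [a, m)
theorem pvPass (ic : List Bool) (r c : List Int) (j' : Int) (m : Nat) (P : Int → Bool) :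
    ∀ (len a : Nat) (tmp : Int), a + len = m →
    (List.range' a len).foldl (fun st (k : Nat) => pvStepA r c j' st (k : Int))
        (pvHyb ic r c m P j' a, tmp)
      = (pvHyb ic r c m P j' m,
         tmp + ((List.range' a len).countP
           (fun i => !pvCore ic i && (!P (pvT r c i) && decide (pvT r c i ≤ j'))))) := by
  intro len
  induction len with
  | zero =>
    intro a tmp ham
    have : a = m := by omega
    subst this
    simp
  | succ len ih =>
    intro a tmp ham
    rw [List.range'_succ, List.foldl_cons, List.countP_cons]
    have ha : a < m := by omega
    have hget : PySem.List.pyGet? (pvHyb ic r c m P j' a) (a : Int)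
        = some (pvCore ic a || P (pvT r c a)) := by
      rw [PySem.List.pyGet?_natCast]
      simp [pvHyb, ha]
    cases hb : pvCore ic a || P (pvT r c a) with
    | false =>
      rw [hb] at hget
      have hcond : ((PySem.List.pyGet? r (a : Int)).getD 0 - j'
          ≤ (PySem.List.pyGet? c (a : Int)).getD 0) ↔ (pvT r c a ≤ j') := by
        rw [PySem.List.pyGet?_natCast, PySem.List.pyGet?_natCast]
        unfold pvT
        rw [List.getD_eq_getElem?_getD, List.getD_eq_getElem?_getD]
        omega
      rw [Bool.or_eq_false_iff] at hb
      by_cases hle : pvT r c a ≤ j'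
      · have hstep : pvStepA r c j' (pvHyb ic r c m P j' a, tmp) (a : Int)
            = ((pvHyb ic r c m P j' a).set a true, tmp + 1) := by
          unfold pvStepA
          rw [hget]
          rw [if_pos (hcond.mpr hle)]
          simp
        rw [hstep, pvHybSet ic r c m P j' a ha (by simp [hb.1, hb.2, hle]),
          ih (a + 1) (tmp + 1) (by omega)]
        have hpred : (!pvCore ic a && (!P (pvT r c a) && decide (pvT r c a ≤ j'))) = true := by
          simp [hb.1, hb.2, hle]
        rw [hpred]
        simp only [if_true]
        refine Prod.ext rfl ?_
        push_cast
        ring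
      · have hstep : pvStepA r c j' (pvHyb ic r c m P j' a, tmp) (a : Int)
            = (pvHyb ic r c m P j' a, tmp) := by
          unfold pvStepA
          rw [hget]
          rw [if_neg (fun hcc => hle (hcond.mp hcc))]
        rw [hstep, pvHybSucc ic r c m P j' a (by simp [hb.1, hb.2, hle]),
          ih (a + 1) tmp (by omega)]
        have hpred : (!pvCore ic a && (!P (pvT r c a) && decide (pvT r c a ≤ j'))) = false := by
          simp [hb.1, hb.2, hle]
        rw [hpred]
        simp
    | true =>
      rw [hb] at hget
      have hstep : pvStepA r c j' (pvHyb ic r c m P j' a, tmp) (a : Int)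
          = (pvHyb ic r c m P j' a, tmp) := by
        unfold pvStepA
        rw [hget]
      have hval : (pvCore ic a || P (pvT r c a))
          = (pvCore ic a || (P (pvT r c a) || decide (pvT r c a ≤ j'))) := by
        rw [Bool.or_eq_true_iff] at hb
        rcases hb with hb | hb <;> simp [hb]
      have hpred : (!pvCore ic a && (!P (pvT r c a) && decide (pvT r c a ≤ j'))) = false := by
        rw [Bool.or_eq_true_iff] at hb
        rcases hb with hb | hb <;> simp [hb]
      rw [hstep, pvHybSucc ic r c m P j' a hval, ih (a + 1) tmp (by omega), hpred]
      simp

-- the full pass, phrased on A's fold over pyRange and the threshold list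
theorem pvPassFull (ic : List Bool) (r c : List Int) (j' : Int) (n : Int) (P : Int → Bool) :
    (PySem.List.pyRange 0 n 1).foldl (pvStepA r c j') (pvMark ic r c n.toNat P, (0 : Int))
      = (pvMark ic r c n.toNat (fun x => P x || decide (x ≤ j')),
         ((pvTh ic r c n.toNat).countP (fun x => !P x && decide (x ≤ j')) : Int)) := by
  have h0 : pvHyb ic r c n.toNat P j' 0 = pvMark ic r c n.toNat P := by
    unfold pvHyb pvMark
    apply List.map_congr_left
    intro i _
    rw [if_neg (by omega)]
  have hm : pvHyb ic r c n.toNat P j' n.toNat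
      = pvMark ic r c n.toNat (fun x => P x || decide (x ≤ j')) := by
    unfold pvHyb pvMark
    apply List.map_congr_left
    intro i hi
    rw [List.mem_range] at hi
    rw [if_pos hi]
  have hcnt : (List.range n.toNat).countP
        (fun i => !pvCore ic i && (!P (pvT r c i) && decide (pvT r c i ≤ j')))
      = (pvTh ic r c n.toNat).countP (fun x => !P x && decide (x ≤ j')) := by
    unfold pvTh
    rw [List.countP_map, List.countP_filter]
    apply List.countP_congr
    intro i _
    cases hc : pvCore ic i <;> cases hP : P (pvT r c i) <;>
      cases hd : decide (pvT r c i ≤ j') <;> simp [hP, hd]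
  rw [PySem.List.pyRange_one, List.foldl_map]
  simp only [Int.sub_zero, zero_add]
  rw [List.range_eq_range', ← h0, pvPass ic r c j' n.toNat P n.toNat 0 0 (by omega), hm,
    ← List.range_eq_range', hcnt]
  simp

-- in a sorted list, the elements ≤ j are exactly the first countP-many
theorem pvSortedIndexLt (ts : List Int) (hs : ts.Pairwise (· ≤ ·)) (j : Int) :
    ∀ i (hi : i < ts.length),
      (ts[i] ≤ j ↔ i < ts.countP (fun x => decide (x ≤ j))) := by
  induction ts with
  | nil => intro i hi; simp at hi
  | cons x l ih =>
    rw [List.pairwise_cons] at hs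
    intro i hi
    rw [List.countP_cons]
    cases i with
    | zero =>
      simp only [List.getElem_cons_zero]
      by_cases hx : x ≤ j
      · simp [hx]
      · have h0 : l.countP (fun x => decide (x ≤ j)) = 0 := by
          rw [List.countP_eq_zero]
          intro y hy
          have := hs.1 y hy
          simp only [decide_eq_true_eq]
          omega
        simp [hx, h0]
    | succ i =>
      simp only [List.getElem_cons_succ]
      have hi' : i < l.length := by simpa using hi
      by_cases hx : x ≤ j
      · rw [ih hs.2 i hi']
        simp [hx]
      · have h0 : l.countP (fun x => decide (x ≤ j)) = 0 := by
          rw [List.countP_eq_zero]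
          intro y hy
          have := hs.1 y hy
          simp only [decide_eq_true_eq]
          omega
        have hgt : ¬ l[i] ≤ j := by
          have := hs.1 l[i] (List.getElem_mem hi')
          omega
        simp [hx, h0, hgt]

theorem pvAdvanceSpec (ts : List Int) (j : Int) (p : Nat) (hs : ts.Pairwise (· ≤ ·)) :
    p ≤ ts.countP (fun x => decide (x ≤ j)) →
    pvAdvance ts j p = ts.countP (fun x => decide (x ≤ j)) := by
  fun_induction pvAdvance ts j p with
  | case1 q h hle ih =>
    intro hp
    exact ih ((pvSortedIndexLt ts hs j q h).mp hle)
  | case2 q h hle =>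
    intro hp
    have := (pvSortedIndexLt ts hs j q h).mpr
    omega
  | case3 q h =>
    intro hp
    have := List.countP_le_length (l := ts) (p := fun x => decide (x ≤ j))
    omega

theorem pvCountPSplit (l : List Int) (a b : Int → Bool)
    (h : ∀ x ∈ l, a x = true → b x = true) :
    l.countP b = l.countP a + l.countP (fun x => !a x && b x) := by
  induction l with
  | nil => simp
  | cons x l ih =>
    have hx := h x List.mem_cons_self
    have ihl := ih (fun y hy => h y (List.mem_cons_of_mem _ hy))
    simp only [List.countP_cons, ihl]
    cases ha : a x <;> cases hb : b x <;> simp_all <;> omega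

-- the main simulation: A's loop from mark-state P equals B's loop from pointer countP P
theorem pvLoopAgree (n : Int) (ic : List Bool) (r c : List Int) (ts : List Int)
    (hts : ts = PySem.List.sorted (pvTh ic r c n.toNat) (fun x => x) false) :
    ∀ (K : Nat) (P : Int → Bool) (acc : List Int) (jA : Int),
      (pvTh ic r c n.toNat).countP (fun x => !P x) = K →
      acc ≠ [] →
      (∀ x, P x = true → x ≤ jA + acc.getLastD 0) →
      pvLoopA n r c (pvMark ic r c n.toNat P) acc jA
        = pvLoopB ts acc (jA + acc.getLastD 0) (ts.countP P) := by
  intro K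
  induction K using Nat.strong_induction_on with
  | _ K ih =>
    intro P acc jA hK hacc hPle
    have hperm : ts.Perm (pvTh ic r c n.toNat) := by
      rw [hts]; exact PySem.List.sorted_perm _ _ _
    have hsort : ts.Pairwise (· ≤ ·) := by
      rw [hts]
      have := PySem.List.sorted_pairwise (pvTh ic r c n.toNat) (fun x => x)
      simpa using this
    set jB := jA + acc.getLastD 0 with hjB
    set cNew := (pvTh ic r c n.toNat).countP (fun x => !P x && decide (x ≤ jB)) with hcNew
    have hple' : ∀ x ∈ ts, P x = true → decide (x ≤ jB) = true := by
      intro x _ hx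
      simpa using hPle x hx
    have hsplit : ts.countP (fun x => decide (x ≤ jB))
        = ts.countP P + ts.countP (fun x => !P x && decide (x ≤ jB)) :=
      pvCountPSplit ts P _ hple'
    have hcount_ts : ts.countP (fun x => !P x && decide (x ≤ jB)) = cNew :=
      hperm.countP_eq _
    have hq : pvAdvance ts jB (ts.countP P) = ts.countP (fun x => decide (x ≤ jB)) :=
      pvAdvanceSpec ts jB _ hsort (by omega)
    rw [pvLoopA, pvLoopB]
    simp only [← hjB, pvPassFull ic r c jB n P, hq, ← hcNew]
    by_cases hpos : 0 < cNew
    · rw [dif_pos (by exact_mod_cast hpos), dif_neg (by omega)]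
      have hlast : ((acc ++ [(cNew : Int)]).getLastD 0) = (cNew : Int) := by
        simp
      have hP' : ts.countP (fun x => P x || decide (x ≤ jB))
          = ts.countP (fun x => decide (x ≤ jB)) := by
        apply List.countP_congr
        intro x hxmem
        cases hPx : P x
        · simp
        · simp [hple' x hxmem hPx]
      have hKsplit : K = cNew + (pvTh ic r c n.toNat).countP
          (fun x => !(P x || decide (x ≤ jB))) := by
        rw [← hK, pvCountPSplit (pvTh ic r c n.toNat)
          (fun x => !P x && decide (x ≤ jB)) (fun x => !P x)
          (by intro x _ hx; simp only [Bool.and_eq_true] at hx; exact hx.1)]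
        congr 1
        apply List.countP_congr
        intro x _
        cases hPx : P x <;> cases hd : decide (x ≤ jB) <;> simp_all
      have hrec := ih ((pvTh ic r c n.toNat).countP (fun x => !(P x || decide (x ≤ jB))))
        (by omega) (fun x => P x || decide (x ≤ jB)) (acc ++ [(cNew : Int)]) jB rfl
        (by simp)
        (by
          intro x hx
          rw [hlast]
          rcases Bool.or_eq_true_iff.mp hx with hx | hx
          · have := hPle x hx; omega
          · simp only [decide_eq_true_eq] at hx; omega)
      rw [hrec, hlast, hP']
      have harith : ((ts.countP fun x => decide (x ≤ jB) : Nat) : Int)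
          - ((ts.countP P : Nat) : Int) = (cNew : Int) := by omega
      rw [harith]
    · rw [dif_neg (by omega), dif_pos (by omega)]

theorem pvBuild (g : Int → Bool) (idxs : List Int) (acc : List Bool) :
    idxs.foldl (fun a i => if g i then a ++ [true] else a ++ [false]) acc
      = acc ++ idxs.map g := by
  induction idxs generalizing acc with
  | nil => simp
  | cons i idxs ih =>
    rw [List.foldl_cons, List.map_cons]
    by_cases hg : g i <;> simp [hg, ih]

-- ===== VERDICT (by name: the statement is the Claim_ definition above) =====
theorem calculate_multidimensional_h_spec : Claim_equal_calculate_multidimensional_h := by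
  unfold Claim_equal_calculate_multidimensional_h
  intro h_ n ic r c _ _
  unfold Spec_calculate_multidimensional_h
  unfold calculate_multidimensional_h calculate_multidimensional_h_alt
  have hbuild : (PySem.List.pyRange 0 n 1).foldl
      (fun a i => if (PySem.List.pyGet? ic i).getD false then a ++ [true] else a ++ [false]) []
      = pvMark ic r c n.toNat (fun _ => false) := by
    rw [pvBuild (fun i => (PySem.List.pyGet? ic i).getD false) _ [], PySem.List.pyRange_one]
    simp only [Int.sub_zero, List.map_map, List.nil_append]
    unfold pvMark
    apply List.map_congr_left
    intro k _
    simp [Function.comp, PySem.List.pyGet?_natCast, pvCore, List.getD_eq_getElem?_getD]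
  have hts0 : ((PySem.List.pyRange 0 n 1).filter
        (fun i => !((PySem.List.pyGet? ic i).getD false))).map
      (fun i => (PySem.List.pyGet? r i).getD 0 - (PySem.List.pyGet? c i).getD 0)
      = pvTh ic r c n.toNat := by
    rw [PySem.List.pyRange_one]
    simp only [Int.sub_zero, List.filter_map, List.map_map]
    unfold pvTh
    rw [List.filter_congr (q := fun i => !pvCore ic i)
      (by intro k _; simp [Function.comp, PySem.List.pyGet?_natCast, pvCore,
        List.getD_eq_getElem?_getD])]
    apply List.map_congr_left
    intro k _
    simp [Function.comp, PySem.List.pyGet?_natCast, pvT, List.getD_eq_getElem?_getD]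
  have hmain := pvLoopAgree n ic r c
    (PySem.List.sorted (pvTh ic r c n.toNat) (fun x => x) false) rfl
    ((pvTh ic r c n.toNat).countP (fun x => !(fun _ : Int => false) x))
    (fun _ => false) [h_] 0 rfl (by simp) (by simp)
  simp only [List.getLastD, zero_add] at hmain
  have hcnt0 : (PySem.List.sorted (pvTh ic r c n.toNat) (fun x => x) false).countP
      (fun _ : Int => false) = 0 := by
    simp
  rw [hcnt0] at hmain
  rw [hbuild, hts0]
  exact hmain
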